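-- pv_equiv track=rewrite | github.com/T-Srikanth/DSML | A9.py | solve
-- ===== SOURCE A (Python) =====
-- def solve(A):
--   ret = [[]]
--   for i in A:
--     if i < 0:
--       ret.append([])
--     else:
--       ret[-1].append(i)
--   mxlen = max([len(i) for i in ret])
--   for i in ret:
--     if len(i) == mxlen:
--       return i
-- ===== SOURCE B (Python) =====
-- def solve(A):
--   best = None
--   cur = []
--   for x in A:
--     if x < 0:
--       if best is None or len(cur) > len(best):
--         best = cur
--       cur = []
--     else:
--       cur.append(x)
--   if best is None or len(cur) > len(best):
--     best = cur
--   return best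
-- ===== Notes on version B (the rewrite author's own statement) =====
-- stated objective: alternative
-- what changed: B keeps only the current run and the best run so far in a single pass (strict > keeps the first maximum), instead of building the full list of segments and then making a max pass plus a search pass; trades the segment list for O(1) bookkeeping at the same asymptotic cost.
import Mathlib
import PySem

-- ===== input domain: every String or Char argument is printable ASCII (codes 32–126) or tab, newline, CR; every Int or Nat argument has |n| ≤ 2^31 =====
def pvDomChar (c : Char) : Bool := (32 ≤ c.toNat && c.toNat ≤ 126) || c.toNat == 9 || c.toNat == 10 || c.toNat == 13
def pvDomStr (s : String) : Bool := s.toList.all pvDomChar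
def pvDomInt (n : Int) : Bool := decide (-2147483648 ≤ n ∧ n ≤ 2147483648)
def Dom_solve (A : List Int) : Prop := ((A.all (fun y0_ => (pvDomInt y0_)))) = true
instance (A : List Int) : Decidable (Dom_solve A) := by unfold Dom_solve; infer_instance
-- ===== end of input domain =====

-- B folds the two extra passes of A into one pass that keeps only the current and the best run (strict > keeps the first maximum); an alternative decomposition at the same cost.

-- ===== PORT A =====
-- ret[-1].append(i): replace the last element of the (always nonempty) list of segments
def appendLast (ret : List (List Int)) (i : Int) : List (List Int) :=
  match ret with
  | [] => []
  | [s] => [s ++ [i]]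
  | s :: t => s :: appendLast t i

-- "for i in ret: if len(i) == mxlen: return i"  (the trailing [] is Python's unreachable fall-through)
def pickLoop : List (List Int) → Int → List Int
  | [], _ => []
  | s :: t, m => if (s.length : Int) = m then s else pickLoop t m

def solve (A : List Int) : List Int :=
  let ret := A.foldl (fun ret i => if i < 0 then ret ++ [[]] else appendLast ret i) [[]]
  let mxlen := (PySem.List.max? (ret.map fun s => ((s.length : Int))) (fun y => y)).getD 0
  pickLoop ret mxlen

-- ===== PORT B =====
-- "if best is None or len(cur) > len(best): best = cur"
def finalizeB (cur : List Int) (best : Option (List Int)) : Option (List Int) :=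
  match best with
  | none => some cur
  | some b => if b.length < cur.length then some cur else some b

def solve_alt (A : List Int) : List Int :=
  let st := A.foldl (fun (st : List Int × Option (List Int)) x =>
    if x < 0 then ([], finalizeB st.1 st.2) else (st.1 ++ [x], st.2)) ([], none)
  match finalizeB st.1 st.2 with
  | some b => b
  | none => []

-- ===== PRECONDITION & SPEC =====
def Spec_solve (A : List Int) (out : List Int) : Prop := out = solve_alt A
instance (A : List Int) (out : List Int) : Decidable (Spec_solve A out) := by unfold Spec_solve; infer_instance

-- ===== CLAIM (what is proved, stated in full; the proofs are below) =====
def Claim_equal_solve : Prop := ∀ (A : List Int), Dom_solve A → Spec_solve A (solve A)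

-- ===== LEMMAS AND PROOFS =====

-- running max of the Int-cast lengths
def mAux (rest : List (List Int)) (a : Int) : Int :=
  rest.foldl (fun a s => max a (s.length : Int)) a

-- B's keep-first running maximum, on plain lists
def choose (b : List Int) (rest : List (List Int)) : List Int :=
  rest.foldl (fun b s => if b.length < s.length then s else b) b

lemma mAux_ge (rest : List (List Int)) (a : Int) : a ≤ mAux rest a := by
  induction rest generalizing a with
  | nil => simp [mAux]
  | cons s t ih =>
      calc a ≤ max a (s.length : Int) := le_max_left _ _
        _ ≤ mAux t (max a (s.length : Int)) := ih _
        _ = mAux (s :: t) a := rfl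

lemma pickLoop_cons (s : List Int) (t : List (List Int)) (m : Int) :
    pickLoop (s :: t) m = if (s.length : Int) = m then s else pickLoop t m := rfl

lemma appendLast_append (done : List (List Int)) (cur : List Int) (i : Int) :
    appendLast (done ++ [cur]) i = done ++ [cur ++ [i]] := by
  induction done with
  | nil => simp [appendLast]
  | cons d ds ih =>
      cases h : ds ++ [cur] with
      | nil => exact absurd h (by simp)
      | cons x xs =>
          have e : appendLast ((d :: ds) ++ [cur]) i = d :: appendLast (ds ++ [cur]) i := by
            rw [List.cons_append, h]; rfl
          rw [e, ih]; rfl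

lemma bestFold_some (rest : List (List Int)) (b : List Int) :
    rest.foldl (fun ob s => finalizeB s ob) (some b) = some (choose b rest) := by
  induction rest generalizing b with
  | nil => rfl
  | cons s t ih =>
      rw [List.foldl_cons]
      have e : finalizeB s (some b) = some (if b.length < s.length then s else b) :=
        (apply_ite some _ _ _).symm
      rw [e]
      exact ih _

-- choose picks the first element of b :: rest whose length is the maximum
lemma choose_eq_pick (rest : List (List Int)) (b : List Int) :
    choose b rest = pickLoop (b :: rest) (mAux rest (b.length : Int)) := by
  induction rest generalizing b with
  | nil => simp [choose, mAux, pickLoop]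
  | cons s t ih =>
      by_cases h : b.length < s.length
      · -- the new element is strictly longer: b can never be the chosen maximum
        have hstep : choose b (s :: t) = choose s t := by simp [choose, if_pos h]
        have hm : mAux (s :: t) (b.length : Int) = mAux t (s.length : Int) := by
          simp only [mAux, List.foldl_cons]; congr 1; omega
        have hge : (s.length : Int) ≤ mAux t (s.length : Int) := mAux_ge t _
        have hb : ¬ ((b.length : Int) = mAux t (s.length : Int)) := by
          have : (b.length : Int) < (s.length : Int) := by exact_mod_cast h
          omega
        rw [hstep, ih s, hm]
        conv_rhs => rw [pickLoop_cons]
        rw [if_neg hb]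
      · -- s is not longer than b: b survives, and s can only be the maximum if b is
        have hstep : choose b (s :: t) = choose b t := by simp [choose, if_neg h]
        have hm : mAux (s :: t) (b.length : Int) = mAux t (b.length : Int) := by
          simp only [mAux, List.foldl_cons]; congr 1; omega
        have hge : (b.length : Int) ≤ mAux t (b.length : Int) := mAux_ge t _
        rw [hstep, ih b, hm]
        conv_rhs => rw [pickLoop_cons]
        rw [pickLoop_cons, pickLoop_cons]
        by_cases hmax : (b.length : Int) = mAux t (b.length : Int)
        · rw [if_pos hmax, if_pos hmax]
        · have hsl : (s.length : Int) ≤ (b.length : Int) := by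
            have := Nat.le_of_not_lt h; exact_mod_cast this
          have hs : ¬ ((s.length : Int) = mAux t (b.length : Int)) := by omega
          rw [if_neg hmax, if_neg hmax, if_neg hs]

-- core: finalizing B's best over `done` against `cur` = A's selection over done ++ [cur]
lemma core (done : List (List Int)) (cur : List Int) :
    finalizeB cur (done.foldl (fun ob s => finalizeB s ob) none)
      = some (pickLoop (done ++ [cur])
          ((PySem.List.max? ((done ++ [cur]).map fun s => ((s.length : Int))) (fun y => y)).getD 0)) := by
  cases done with
  | nil =>
      simp [finalizeB, PySem.List.max?_id_cons, pickLoop]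
  | cons d ds =>
      have hmax : PySem.List.max? (((d :: ds) ++ [cur]).map fun s => ((s.length : Int))) (fun y => y)
          = some (mAux (ds ++ [cur]) (d.length : Int)) := by
        rw [List.cons_append, List.map_cons, PySem.List.max?_id_cons]
        simp [mAux, List.foldl_map]
      rw [hmax]
      have h1 : (d :: ds).foldl (fun ob s => finalizeB s ob) none
          = some (choose d ds) := by
        simpa using bestFold_some ds d
      rw [h1]
      have h2 : finalizeB cur (some (choose d ds)) = some (choose d (ds ++ [cur])) := by
        simp only [choose, List.foldl_append, List.foldl_cons, List.foldl_nil, finalizeB]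
        split_ifs <;> rfl
      rw [h2, choose_eq_pick]
      simp

-- main invariant over the traversal
lemma inv (A : List Int) (done : List (List Int)) (cur : List Int) :
    (let st := A.foldl (fun (st : List Int × Option (List Int)) x =>
        if x < 0 then ([], finalizeB st.1 st.2) else (st.1 ++ [x], st.2))
        (cur, done.foldl (fun ob s => finalizeB s ob) none)
     finalizeB st.1 st.2)
    = (let ret := A.foldl (fun ret i => if i < 0 then ret ++ [[]] else appendLast ret i) (done ++ [cur])
       some (pickLoop ret ((PySem.List.max? (ret.map fun s => ((s.length : Int))) (fun y => y)).getD 0))) := by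
  induction A generalizing done cur with
  | nil => simpa using core done cur
  | cons x xs ih =>
      by_cases hx : x < 0
      · have hB : finalizeB cur (done.foldl (fun ob s => finalizeB s ob) none)
            = (done ++ [cur]).foldl (fun ob s => finalizeB s ob) none := by
          simp [List.foldl_append]
        simp only [List.foldl_cons, if_pos hx]
        rw [hB]
        have := ih (done ++ [cur]) []
        simpa [List.append_assoc] using this
      · simp only [List.foldl_cons, if_neg hx]
        rw [appendLast_append]
        have := ih done (cur ++ [x])
        simpa using this

-- ===== VERDICT (by name: the statement is the Claim_ definition above) =====
theorem solve_spec : Claim_equal_solve := by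
  intro A _
  unfold Spec_solve
  have h := inv A [] []
  simp only [List.foldl_nil, List.nil_append] at h
  simp only [solve, solve_alt]
  rw [h]
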